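-- pv_equiv track=rewrite | github.com/agsm159/ifpi-ads-algoritmos2020 | URI_1024_CRIPTOGRAFIA.py | passo_tres
-- ===== SOURCE A (Python) =====
-- def passo_tres(texto):
--     frase_3 = ""
--     for i in range(len(texto)):
--         n = ord(texto[i])
--         if n != 240 and (i >= len(texto)//2):
--             n = ord(texto[i]) - 1
--             n = chr(n)
--             frase_3 += n
--         else:
--             n = chr(n)
--             frase_3 += n
--     return frase_3
-- ===== SOURCE B (Python) =====
-- def passo_tres(texto):
--     # Build the result back-to-front: walk the string in reverse with a countdown k
--     # of how many trailing characters remain to be shifted, then reverse at the end.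
--     out = []
--     k = len(texto) - len(texto) // 2
--     for c in reversed(texto):
--         if k > 0 and ord(c) != 240:
--             out.append(chr(ord(c) - 1))
--         else:
--             out.append(c)
--         k -= 1
--     return "".join(reversed(out))
-- ===== Notes on version B (the rewrite author's own statement) =====
-- stated objective: alternative
-- what changed: Instead of A's forward index loop testing i >= len//2 per character with string +=, B traverses the string back-to-front with a countdown of how many trailing characters still need shifting, appends into a list and reverses/joins once at the end.
import Mathlib
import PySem

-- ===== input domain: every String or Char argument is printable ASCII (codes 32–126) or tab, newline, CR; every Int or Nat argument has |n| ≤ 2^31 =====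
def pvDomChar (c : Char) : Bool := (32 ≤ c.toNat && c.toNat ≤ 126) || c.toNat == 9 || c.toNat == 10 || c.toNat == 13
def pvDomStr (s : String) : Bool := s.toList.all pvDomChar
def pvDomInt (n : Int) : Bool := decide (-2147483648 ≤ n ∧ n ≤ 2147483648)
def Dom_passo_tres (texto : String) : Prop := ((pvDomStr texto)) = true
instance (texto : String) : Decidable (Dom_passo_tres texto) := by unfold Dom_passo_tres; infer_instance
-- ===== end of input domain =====

-- B builds the result back-to-front: it walks the reversed string with a countdown of the
-- trailing characters still to shift, then reverses once; same return value as A's forward loop.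

-- ===== PORT A =====
-- for i in range(len(texto)): n = ord(texto[i]); decrement iff n != 240 and i >= len//2
def passo_tres (texto : String) : String :=
  let cs := texto.toList
  String.mk ((PySem.List.pyRange 0 cs.length 1).foldl (fun frase i =>
    let n : Nat := (PySem.List.pyGetD cs i 'a').toNat    -- texto[i]; i always in range
    if n ≠ 240 ∧ i ≥ PySem.Int.floordiv cs.length 2 then
      frase ++ [Char.ofNat (n - 1)]
    else
      frase ++ [Char.ofNat n]) [])

-- ===== PORT B =====
-- the loop 'for c in reversed(texto): … ; k -= 1' as recursion over the reversed char list;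
-- Python's k is an int going negative, but it is only compared with 0, so Nat's k-1 is exact.
def pvGoB : List Char → Nat → List Char
  | [], _ => []
  | c :: rest, k =>
    (if k > 0 ∧ c.toNat ≠ 240 then Char.ofNat (c.toNat - 1) else c) :: pvGoB rest (k - 1)

def passo_tres_alt (texto : String) : String :=
  let cs := texto.toList
  String.mk ((pvGoB cs.reverse (cs.length - cs.length / 2)).reverse)

-- ===== PRECONDITION & SPEC =====
def Spec_passo_tres (texto : String) (out : String) : Prop := out = passo_tres_alt texto
instance (texto : String) (out : String) : Decidable (Spec_passo_tres texto out) := by unfold Spec_passo_tres; infer_instance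

-- ===== CLAIM (what is proved, stated in full; the proofs are below) =====
def Claim_equal_passo_tres : Prop := ∀ (texto : String), Dom_passo_tres texto → Spec_passo_tres texto (passo_tres texto)

-- ===== LEMMAS AND PROOFS =====

-- the per-character shift both programs perform on the second half
def pvDec (c : Char) : Char := if c.toNat ≠ 240 then Char.ofNat (c.toNat - 1) else c

theorem passo_tres_lists (cs : List Char) :
    (PySem.List.pyRange 0 cs.length 1).foldl (fun frase i =>
      let n : Nat := (PySem.List.pyGetD cs i 'a').toNat
      if n ≠ 240 ∧ i ≥ PySem.Int.floordiv cs.length 2 then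
        frase ++ [Char.ofNat (n - 1)]
      else
        frase ++ [Char.ofNat n]) []
    = cs.take (cs.length / 2) ++ (cs.drop (cs.length / 2)).map pvDec := by
  rw [PySem.List.pyRange_zero_natCast, List.foldl_map]
  have hbody : (fun (frase : List Char) (k : Nat) =>
      let n : Nat := (PySem.List.pyGetD cs ((k : Int)) 'a').toNat
      if n ≠ 240 ∧ (k : Int) ≥ PySem.Int.floordiv (cs.length : Int) 2 then
        frase ++ [Char.ofNat (n - 1)]
      else
        frase ++ [Char.ofNat n])
    = (fun (frase : List Char) (k : Nat) => frase ++
        [let n : Nat := (PySem.List.pyGetD cs ((k : Int)) 'a').toNat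
         if n ≠ 240 ∧ (k : Int) ≥ PySem.Int.floordiv (cs.length : Int) 2 then
           Char.ofNat (n - 1) else Char.ofNat n]) := by
    funext frase k; simp only []; split <;> rfl
  rw [hbody, PySem.List.foldl_append_singleton_eq_map]
  apply List.ext_getElem
  · simp; omega
  · intro k h1 h2
    have hk : k < cs.length := by simpa using h1
    have hfd : PySem.Int.floordiv (cs.length : Int) 2 = ((cs.length / 2 : Nat) : Int) :=
      PySem.Int.floordiv_natCast _ _
    simp only [List.nil_append, List.getElem_map, List.getElem_range,
      PySem.List.pyGetD_natCast, List.getD_eq_getElem cs 'a' hk, hfd]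
    by_cases hmid : cs.length / 2 ≤ k
    · rw [List.getElem_append_right (by simp; omega)]
      simp only [List.getElem_map, List.getElem_drop, List.length_take,
        Nat.min_eq_left (Nat.div_le_self _ _)]
      have hrestore : cs.length / 2 + (k - cs.length / 2) = k := by omega
      by_cases h240 : cs[k].toNat = 240
      · rw [if_neg (by simp [h240]), pvDec, if_neg (by simp [hrestore, h240])]
        simp [Char.ofNat_toNat, hrestore]
      · rw [if_pos ⟨h240, by exact_mod_cast hmid⟩, pvDec, if_pos (by simp [hrestore, h240])]
        simp [hrestore]
    · rw [List.getElem_append_left (by simp; omega)]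
      rw [if_neg (by push_neg; intro _; exact_mod_cast Nat.lt_iff_add_one_le.mp (by omega))]
      simp [Char.ofNat_toNat, List.getElem_take]

-- pvGoB shifts exactly the first k characters of the list it walks
theorem pvGoB_eq (l : List Char) : ∀ k : Nat, pvGoB l k = (l.take k).map pvDec ++ l.drop k := by
  induction l with
  | nil => intro k; simp [pvGoB]
  | cons c rest ih =>
    intro k
    cases k with
    | zero =>
      simp [pvGoB, ih 0]
    | succ m =>
      simp only [pvGoB, Nat.add_sub_cancel, ih m, List.take_succ_cons, List.drop_succ_cons,
        List.map_cons, List.cons_append]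
      congr 1
      simp [pvDec]
-- ===== VERDICT (by name: the statement is the Claim_ definition above) =====
theorem passo_tres_spec : Claim_equal_passo_tres := by
  intro texto _
  unfold Spec_passo_tres passo_tres passo_tres_alt
  simp only
  rw [passo_tres_lists, pvGoB_eq]
  have hk : texto.toList.length - (texto.toList.length - texto.toList.length / 2)
      = texto.toList.length / 2 := by omega
  rw [List.reverse_append, List.take_reverse, List.drop_reverse, hk,
    List.reverse_reverse, ← List.map_reverse, List.reverse_reverse]
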